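-- pv_equiv track=rewrite | github.com/leele2/ts_xlxs_to_ics | backend/utils/excel.py | group_dates_into_sections
-- ===== SOURCE A (Python) =====
-- from typing import Dict, List, Tuple, Optional, Union
--
-- def group_dates_into_sections(date_positions: List[Tuple[int, int, str]]) -> List[List[Tuple[int, int, str]]]:
--     """Group date positions into sections based on column proximity.
--
--     Args:
--         date_positions (List[Tuple[int, int, str]]): List of (row, col, date) tuples.
--
--     Returns:
--         List[List[Tuple[int, int, str]]]: List of sections, where each section is a list of (row, col, date) tuples.
--     """
--     if not date_positions:
--         return []
--     date_sections = []
--     current_section = []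
--     date_positions.sort(key=lambda x: x[1])
--     last_col = date_positions[0][1]
--     for date_row, date_col, date in date_positions:
--         if date_col - last_col > 1:
--             date_sections.append(current_section)
--             current_section = []
--         current_section.append((date_row, date_col, date))
--         last_col = date_col
--     if current_section:
--         date_sections.append(current_section)
--     return date_sections
-- ===== SOURCE B (Python) =====
-- def group_dates_into_sections(date_positions):
--     """Two-pass variant: sort in place, collect the break indices where the
--     column gap exceeds 1, then slice the sorted list at those breaks."""
--     if not date_positions:
--         return []
--     date_positions.sort(key=lambda x: x[1])
--     n = len(date_positions)
--     breaks = [i for i in range(1, n)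
--               if date_positions[i][1] - date_positions[i - 1][1] > 1]
--     sections = []
--     prev = 0
--     for b in breaks + [n]:
--         sections.append(date_positions[prev:b])
--         prev = b
--     return sections
-- ===== Notes on version B (the rewrite author's own statement) =====
-- stated objective: alternative
-- what changed: Replaced the single interleaved append-with-branch loop over the sorted list by two separate passes: one pass collecting the break indices where the column gap exceeds 1, and one pass slicing the sorted list at those breaks.
import Mathlib
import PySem

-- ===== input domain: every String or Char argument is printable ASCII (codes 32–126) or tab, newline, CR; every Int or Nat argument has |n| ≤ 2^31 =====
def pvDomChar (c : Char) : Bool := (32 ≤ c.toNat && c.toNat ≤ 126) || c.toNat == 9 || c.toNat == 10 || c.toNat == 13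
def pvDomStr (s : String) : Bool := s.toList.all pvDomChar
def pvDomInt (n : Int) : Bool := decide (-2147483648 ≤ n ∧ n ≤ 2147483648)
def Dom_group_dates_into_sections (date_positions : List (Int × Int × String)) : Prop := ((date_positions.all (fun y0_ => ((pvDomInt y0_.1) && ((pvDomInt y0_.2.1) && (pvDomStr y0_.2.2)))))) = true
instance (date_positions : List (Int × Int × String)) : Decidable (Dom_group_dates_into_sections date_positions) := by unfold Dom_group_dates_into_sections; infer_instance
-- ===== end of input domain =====

-- A groups sorted (row, col, date) tuples in one interleaved loop; B first collects break
-- indices, then slices the sorted list at them (alternative decomposition, same cost).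
-- Both Pythons sort the argument in place; the equivalence proved here is about the return value.


-- ===== PORT A =====
def group_dates_into_sections (date_positions : List (Int × Int × String)) : List (List (Int × Int × String)) :=
  match date_positions with
  | [] => []
  | _ :: _ =>
    let sorted := PySem.List.sorted date_positions (fun x => x.2.1) false
    -- date_positions[0][1] after the in-place sort; the list is nonempty here so [0] is in range
    let last_col := (PySem.List.pyGetD sorted 0 (0, 0, "")).2.1
    let r := sorted.foldl
      (fun (st : List (List (Int × Int × String)) × List (Int × Int × String) × Int) x =>
        if x.2.1 - st.2.2 > 1 then (st.1 ++ [st.2.1], [x], x.2.1)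
        else (st.1, st.2.1 ++ [x], x.2.1))
      ([], [], last_col)
    if r.2.1.isEmpty then r.1 else r.1 ++ [r.2.1]

-- ===== PORT B =====
def group_dates_into_sections_alt (date_positions : List (Int × Int × String)) : List (List (Int × Int × String)) :=
  match date_positions with
  | [] => []
  | _ :: _ =>
    let s := PySem.List.sorted date_positions (fun x => x.2.1) false
    let n : Int := s.length
    -- Python indexes date_positions[i] and [i-1] directly; i comes from range(1, n) so both
    -- indices are always in range and the 'none' fallback below is unreachable
    let breaks := (PySem.List.pyRange 1 n 1).filter (fun i =>
      match PySem.List.pyGet? s i, PySem.List.pyGet? s (i - 1) with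
      | some a, some b => decide (a.2.1 - b.2.1 > 1)
      | _, _ => false)
    let r := (breaks ++ [n]).foldl
      (fun (st : List (List (Int × Int × String)) × Int) b =>
        (st.1 ++ [PySem.List.slice s (some st.2) (some b)], b))
      ([], 0)
    r.1

-- ===== PRECONDITION & SPEC =====
def Spec_group_dates_into_sections (date_positions : List (Int × Int × String)) (out : List (List (Int × Int × String))) : Prop := out = group_dates_into_sections_alt date_positions
instance (date_positions : List (Int × Int × String)) (out : List (List (Int × Int × String))) : Decidable (Spec_group_dates_into_sections date_positions out) := by unfold Spec_group_dates_into_sections; infer_instance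

-- ===== CLAIM (what is proved, stated in full; the proofs are below) =====
def Claim_equal_group_dates_into_sections : Prop := ∀ (date_positions : List (Int × Int × String)), Dom_group_dates_into_sections date_positions → Spec_group_dates_into_sections date_positions (group_dates_into_sections date_positions)

-- ===== LEMMAS AND PROOFS =====

-- canonical recursive grouping: `run cur last l` finishes the current section `cur`
-- (whose last element has column `last`) through the remaining elements `l`
def pvRun (cur : List (Int × Int × String)) (last : Int) :
    List (Int × Int × String) → List (List (Int × Int × String))
  | [] => [cur]
  | x :: t => if x.2.1 - last > 1 then cur :: pvRun [x] x.2.1 t else pvRun (cur ++ [x]) x.2.1 t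

theorem pvRun_append (a b : List (Int × Int × String)) (last : Int)
    (l : List (Int × Int × String)) :
    pvRun (a ++ b) last l =
      match pvRun b last l with
      | [] => []
      | h :: t => (a ++ h) :: t := by
  induction l generalizing b last with
  | nil => simp [pvRun]
  | cons x t ih =>
    simp only [pvRun]
    split
    · rfl
    · rw [List.append_assoc]; exact ih (b ++ [x]) x.2.1


-- the step condition of B's break-index pass, as the port writes it
theorem pvGetShift (x : Int × Int × String) (s : List (Int × Int × String)) (j : Int) (hj : 0 ≤ j) :
    PySem.List.pyGet? (x :: s) (j + 1) = PySem.List.pyGet? s j := by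
  rw [PySem.List.pyGet?_of_nonneg _ (by omega : (0:Int) ≤ j + 1), PySem.List.pyGet?_of_nonneg _ hj]
  have h : (j + 1).toNat = j.toNat + 1 := by omega
  rw [h, List.getElem?_cons_succ]

theorem pvRangeShift (a b : Int) :
    PySem.List.pyRange (a + 1) (b + 1) 1 = (PySem.List.pyRange a b 1).map (· + 1) := by
  rw [PySem.List.pyRange_one, PySem.List.pyRange_one]
  have h : (b + 1 - (a + 1)).toNat = (b - a).toNat := by omega
  rw [h, List.map_map]
  exact List.map_congr_left (fun k _ => by simp; ring)

-- B's break condition shifted one position down a cons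
theorem pvCondShift (x : Int × Int × String) (s : List (Int × Int × String)) (i : Int) (hi : 1 ≤ i) :
    (match PySem.List.pyGet? (x :: s) (i + 1), PySem.List.pyGet? (x :: s) (i + 1 - 1) with
      | some a, some b => decide (a.2.1 - b.2.1 > 1)
      | _, _ => false)
    = (match PySem.List.pyGet? s i, PySem.List.pyGet? s (i - 1) with
      | some a, some b => decide (a.2.1 - b.2.1 > 1)
      | _, _ => false) := by
  rw [pvGetShift x s i (by omega)]
  have h : i + 1 - 1 = (i - 1) + 1 := by ring
  rw [h, pvGetShift x s (i - 1) (by omega)]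

theorem pv_one_lt_len_succ (y : Int × Int × String) (t : List (Int × Int × String)) :
    (1 : Int) < ((y :: t).length : Int) + 1 := by
  have h : 1 ≤ (y :: t).length := by simp
  have h2 : (1 : Int) ≤ ((y :: t).length : Int) := by exact_mod_cast h
  linarith

-- the break list of x :: s in terms of the break list of s (s nonempty)
theorem pvBrkCons (x y : Int × Int × String) (t : List (Int × Int × String)) :
    (PySem.List.pyRange 1 ((x :: y :: t).length : Int) 1).filter
      (fun i => match PySem.List.pyGet? (x :: y :: t) i, PySem.List.pyGet? (x :: y :: t) (i - 1) with
        | some a, some b => decide (a.2.1 - b.2.1 > 1)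
        | _, _ => false)
    = (if y.2.1 - x.2.1 > 1 then [(1 : Int)] else [])
      ++ ((PySem.List.pyRange 1 (((y :: t).length : Int)) 1).filter
        (fun i => match PySem.List.pyGet? (y :: t) i, PySem.List.pyGet? (y :: t) (i - 1) with
          | some a, some b => decide (a.2.1 - b.2.1 > 1)
          | _, _ => false)).map (· + 1) := by
  have hn : ((x :: y :: t).length : Int) = ((y :: t).length : Int) + 1 := by
    simp
  rw [hn, PySem.List.pyRange_one_cons (pv_one_lt_len_succ y t), List.filter_cons]
  have hc1 : (match PySem.List.pyGet? (x :: y :: t) (1 : Int), PySem.List.pyGet? (x :: y :: t) ((1 : Int) - 1) with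
      | some a, some b => decide (a.2.1 - b.2.1 > 1)
      | _, _ => false) = decide (y.2.1 - x.2.1 > 1) := by
    rw [show (1 : Int) - 1 = 0 from rfl, PySem.List.pyGet?_zero_cons,
      PySem.List.pyGet?_of_nonneg _ (by omega : (0:Int) ≤ 1)]
    rfl
  rw [hc1, pvRangeShift 1 ((y :: t).length : Int), List.filter_map]
  simp only [Function.comp_def]
  rw [List.filter_congr (fun i hi => pvCondShift x (y :: t) i
      (PySem.List.mem_pyRange_one.mp hi).1)]
  by_cases hg : y.2.1 - x.2.1 > 1 <;> simp [hg]

-- slice arithmetic over a cons cell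
theorem pvSliceShift (x : Int × Int × String) (s : List (Int × Int × String)) (p b : Int)
    (hp : 0 ≤ p) (hb : 0 ≤ b) :
    PySem.List.slice (x :: s) (some (p + 1)) (some (b + 1)) = PySem.List.slice s (some p) (some b) := by
  rw [PySem.List.slice_toNat _ (by omega) (by omega), PySem.List.slice_toNat _ hp hb]
  have h1 : (p + 1).toNat = p.toNat + 1 := by omega
  have h2 : (b + 1).toNat = b.toNat + 1 := by omega
  have h3 : (b.toNat + 1) - (p.toNat + 1) = b.toNat - p.toNat := by omega
  rw [h1, h2, List.drop_succ_cons, h3]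

theorem pvSliceZeroSucc (x : Int × Int × String) (s : List (Int × Int × String)) (b : Int)
    (hb : 0 ≤ b) :
    PySem.List.slice (x :: s) (some 0) (some (b + 1)) = x :: PySem.List.slice s (some 0) (some b) := by
  rw [PySem.List.slice_toNat _ (by omega) (by omega), PySem.List.slice_toNat _ (by omega) hb]
  have h2 : (b + 1).toNat = b.toNat + 1 := by omega
  rw [h2]
  simp

-- accumulator of B's slicing fold factors out
theorem pvFoldSliceAcc (s : List (Int × Int × String)) (L : List Int)
    (acc : List (List (Int × Int × String))) (p : Int) :
    L.foldl (fun (st : List (List (Int × Int × String)) × Int) b =>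
        (st.1 ++ [PySem.List.slice s (some st.2) (some b)], b)) (acc, p)
    = (acc ++ (L.foldl (fun (st : List (List (Int × Int × String)) × Int) b =>
        (st.1 ++ [PySem.List.slice s (some st.2) (some b)], b)) ([], p)).1,
       (L.foldl (fun (st : List (List (Int × Int × String)) × Int) b =>
        (st.1 ++ [PySem.List.slice s (some st.2) (some b)], b)) ([], p)).2) := by
  induction L generalizing acc p with
  | nil => simp
  | cons b tl ih =>
    simp only [List.foldl_cons]
    rw [ih (acc ++ [PySem.List.slice s (some p) (some b)]) b,
        ih ([] ++ [PySem.List.slice s (some p) (some b)]) b]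
    simp

-- B's slicing fold over shifted break indices on x :: s is the fold on s
theorem pvFoldShift (x : Int × Int × String) (s : List (Int × Int × String)) (L : List Int)
    (hL : ∀ b ∈ L, 0 ≤ b) (p : Int) (hp : 0 ≤ p) :
    (L.map (· + 1)).foldl (fun (st : List (List (Int × Int × String)) × Int) b =>
        (st.1 ++ [PySem.List.slice (x :: s) (some st.2) (some b)], b)) ([], p + 1)
    = ((L.foldl (fun (st : List (List (Int × Int × String)) × Int) b =>
        (st.1 ++ [PySem.List.slice s (some st.2) (some b)], b)) ([], p)).1,
       (L.foldl (fun (st : List (List (Int × Int × String)) × Int) b =>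
        (st.1 ++ [PySem.List.slice s (some st.2) (some b)], b)) ([], p)).2 + 1) := by
  induction L generalizing p with
  | nil => simp
  | cons b tl ih =>
    have hb : 0 ≤ b := hL b (by simp)
    simp only [List.map_cons, List.foldl_cons, List.nil_append]
    rw [pvSliceShift x s p b hp hb]
    rw [pvFoldSliceAcc (x :: s) (tl.map (· + 1)) [PySem.List.slice s (some p) (some b)] (b + 1),
        pvFoldSliceAcc s tl [PySem.List.slice s (some p) (some b)] b]
    rw [ih (fun c hc => hL c (by simp [hc])) b hb]

theorem pvSliceZeroOne (x : Int × Int × String) (s : List (Int × Int × String)) :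
    PySem.List.slice (x :: s) (some 0) (some 1) = [x] := by
  rw [PySem.List.slice_toNat _ (by omega) (by omega)]
  simp [List.take_succ_cons]

theorem pvFoldShift1 (x : Int × Int × String) (s : List (Int × Int × String)) (L : List Int)
    (hL : ∀ b ∈ L, 0 ≤ b) :
    (L.map (· + 1)).foldl (fun (st : List (List (Int × Int × String)) × Int) b =>
        (st.1 ++ [PySem.List.slice (x :: s) (some st.2) (some b)], b)) ([], 1)
    = ((L.foldl (fun (st : List (List (Int × Int × String)) × Int) b =>
        (st.1 ++ [PySem.List.slice s (some st.2) (some b)], b)) ([], 0)).1,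
       (L.foldl (fun (st : List (List (Int × Int × String)) × Int) b =>
        (st.1 ++ [PySem.List.slice s (some st.2) (some b)], b)) ([], 0)).2 + 1) := by
  have h := pvFoldShift x s L hL 0 (by omega)
  simpa using h

-- first section of the slicing fold on x :: s absorbs x in front of the head section
theorem pvHeadCons (x : Int × Int × String) (s : List (Int × Int × String)) (L : List Int)
    (hL : ∀ b ∈ L, 0 ≤ b) :
    ((L.map (· + 1) ++ [((s.length : Int)) + 1]).foldl
        (fun (st : List (List (Int × Int × String)) × Int) b =>
          (st.1 ++ [PySem.List.slice (x :: s) (some st.2) (some b)], b)) ([], 0)).1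
    = match ((L ++ [((s.length : Int))]).foldl
        (fun (st : List (List (Int × Int × String)) × Int) b =>
          (st.1 ++ [PySem.List.slice s (some st.2) (some b)], b)) ([], 0)).1 with
      | [] => []
      | h :: t => (x :: h) :: t := by
  cases L with
  | nil =>
    simp only [List.map_nil, List.nil_append, List.foldl_cons, List.foldl_nil]
    rw [pvSliceZeroSucc x s _ (Int.natCast_nonneg _)]
  | cons b tl =>
    have hb : 0 ≤ b := hL b (by simp)
    simp only [List.map_cons, List.cons_append, List.foldl_cons, List.nil_append]
    rw [pvSliceZeroSucc x s b hb]
    have hmap : tl.map (· + 1) ++ [((s.length : Int)) + 1] = (tl ++ [(s.length : Int)]).map (· + 1) := by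
      simp
    rw [hmap]
    rw [pvFoldSliceAcc (x :: s) ((tl ++ [(s.length : Int)]).map (· + 1))
          [x :: PySem.List.slice s (some 0) (some b)] (b + 1),
        pvFoldSliceAcc s (tl ++ [(s.length : Int)]) [PySem.List.slice s (some 0) (some b)] b]
    rw [pvFoldShift x s (tl ++ [(s.length : Int)])
          (by intro c hc; rcases List.mem_append.mp hc with h | h
              · exact hL c (by simp [h])
              · simp at h; omega) b hb]
    simp

-- elements of B's break list are ≥ 1
theorem pvBrkMemNonneg (s : List (Int × Int × String)) (b : Int)
    (hb : b ∈ (PySem.List.pyRange 1 ((s.length : Int)) 1).filter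
      (fun i => match PySem.List.pyGet? s i, PySem.List.pyGet? s (i - 1) with
        | some a, some c => decide (a.2.1 - c.2.1 > 1)
        | _, _ => false)) : 0 ≤ b := by
  have h := (List.mem_filter.mp hb).1
  have h2 := (PySem.List.mem_pyRange_one.mp h).1
  omega

-- B's break-then-slice passes compute the canonical grouping pvRun
theorem pvBsecsRun (s : List (Int × Int × String)) (x : Int × Int × String) :
    (((PySem.List.pyRange 1 (((x :: s).length : Int)) 1).filter
        (fun i => match PySem.List.pyGet? (x :: s) i, PySem.List.pyGet? (x :: s) (i - 1) with
          | some a, some b => decide (a.2.1 - b.2.1 > 1)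
          | _, _ => false) ++ [((x :: s).length : Int)]).foldl
      (fun (st : List (List (Int × Int × String)) × Int) b =>
        (st.1 ++ [PySem.List.slice (x :: s) (some st.2) (some b)], b)) ([], 0)).1
    = pvRun [x] x.2.1 s := by
  induction s generalizing x with
  | nil =>
    have h1 : (([x] : List (Int × Int × String)).length : Int) = 1 := by simp
    rw [h1, PySem.List.pyRange_one_eq_nil (by omega)]
    simp only [List.filter_nil, List.nil_append, List.foldl_cons, List.foldl_nil]
    rw [pvSliceZeroOne]
    rfl
  | cons y t ih =>
    rw [pvBrkCons x y t]
    by_cases hg : y.2.1 - x.2.1 > 1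
    · simp only [hg, if_pos, List.cons_append, List.nil_append, List.foldl_cons]
      rw [pvSliceZeroOne]
      have hn : (((x :: y :: t).length : Int)) = (((y :: t).length : Int)) + 1 := by simp
      rw [hn]
      have hmap : ((PySem.List.pyRange 1 (((y :: t).length : Int)) 1).filter
          (fun i => match PySem.List.pyGet? (y :: t) i, PySem.List.pyGet? (y :: t) (i - 1) with
            | some a, some b => decide (a.2.1 - b.2.1 > 1)
            | _, _ => false)).map (· + 1) ++ [(((y :: t).length : Int)) + 1]
          = (((PySem.List.pyRange 1 (((y :: t).length : Int)) 1).filter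
          (fun i => match PySem.List.pyGet? (y :: t) i, PySem.List.pyGet? (y :: t) (i - 1) with
            | some a, some b => decide (a.2.1 - b.2.1 > 1)
            | _, _ => false)) ++ [(((y :: t).length : Int))]).map (· + 1) := by simp
      rw [hmap]
      rw [pvFoldSliceAcc (x :: y :: t) _ [[x]] 1]
      rw [pvFoldShift1 x (y :: t) _ (by
            intro c hc; rcases List.mem_append.mp hc with h | h
            · exact pvBrkMemNonneg (y :: t) c h
            · simp at h; omega)]
      rw [ih y]
      simp [pvRun, hg]
    · simp only [hg, if_neg, not_false_iff, List.nil_append]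
      have hn : (((x :: y :: t).length : Int)) = (((y :: t).length : Int)) + 1 := by simp
      rw [hn]
      rw [pvHeadCons x (y :: t) _ (fun c hc => pvBrkMemNonneg (y :: t) c hc)]
      rw [ih y]
      have hrw : pvRun [x] x.2.1 (y :: t) = pvRun ([x] ++ [y]) y.2.1 t := by
        simp [pvRun, hg]
      rw [hrw, pvRun_append [x] [y] y.2.1 t]
      rfl

-- A's interleaved fold, with the trailing flush, is the canonical grouping pvRun
theorem pvFoldA (l : List (Int × Int × String)) (secs : List (List (Int × Int × String)))
    (cur : List (Int × Int × String)) (last : Int) :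
    (l.foldl (fun (st : List (List (Int × Int × String)) × List (Int × Int × String) × Int) x =>
        if x.2.1 - st.2.2 > 1 then (st.1 ++ [st.2.1], [x], x.2.1)
        else (st.1, st.2.1 ++ [x], x.2.1)) (secs, cur, last)).1
    ++ [(l.foldl (fun (st : List (List (Int × Int × String)) × List (Int × Int × String) × Int) x =>
        if x.2.1 - st.2.2 > 1 then (st.1 ++ [st.2.1], [x], x.2.1)
        else (st.1, st.2.1 ++ [x], x.2.1)) (secs, cur, last)).2.1]
    = secs ++ pvRun cur last l := by
  induction l generalizing secs cur last with
  | nil => simp [pvRun]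
  | cons z tl ih =>
    simp only [List.foldl_cons, pvRun]
    by_cases hz : z.2.1 - last > 1
    · simp only [hz, if_pos]
      rw [ih (secs ++ [cur]) [z] z.2.1]
      simp
    · simp only [hz, if_neg, not_false_iff]
      exact ih secs (cur ++ [z]) z.2.1

theorem pvFoldANe (l : List (Int × Int × String)) (secs : List (List (Int × Int × String)))
    (cur : List (Int × Int × String)) (last : Int) (hc : cur ≠ []) :
    (l.foldl (fun (st : List (List (Int × Int × String)) × List (Int × Int × String) × Int) x =>
        if x.2.1 - st.2.2 > 1 then (st.1 ++ [st.2.1], [x], x.2.1)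
        else (st.1, st.2.1 ++ [x], x.2.1)) (secs, cur, last)).2.1 ≠ [] := by
  induction l generalizing secs cur last with
  | nil => exact hc
  | cons z tl ih =>
    simp only [List.foldl_cons]
    by_cases hz : z.2.1 - last > 1
    · simp only [hz, if_pos]; exact ih _ _ _ (by simp)
    · simp only [hz, if_neg, not_false_iff]; exact ih _ _ _ (by simp [hc])

theorem group_dates_into_sections_spec : Claim_equal_group_dates_into_sections := by
  intro dp _
  unfold Spec_group_dates_into_sections
  cases dp with
  | nil => rfl
  | cons d rest =>
    simp only [group_dates_into_sections, group_dates_into_sections_alt]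
    have hlen : (PySem.List.sorted (d :: rest) (fun x => x.2.1) false).length = rest.length + 1 := by
      rw [PySem.List.length_sorted]; rfl
    obtain ⟨x, xs, hx⟩ := List.exists_cons_of_ne_nil
      (by intro h; rw [h] at hlen; simp at hlen :
        PySem.List.sorted (d :: rest) (fun x => x.2.1) false ≠ [])
    rw [hx]
    -- A side: first element, then the fold over the tail
    rw [PySem.List.pyGetD_zero_cons]
    simp only [List.foldl_cons, sub_self, show ¬((0 : Int) > 1) from by omega, if_neg,
      not_false_iff, List.nil_append]
    rw [pvBsecsRun xs x]
    have hne := pvFoldANe xs [] [x] x.2.1 (by simp)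
    have hA := pvFoldA xs [] [x] x.2.1
    simp only [List.nil_append] at hA
    simp [List.isEmpty_iff, hne, hA]
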